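-- pv_equiv track=rewrite | github.com/edwcrtn/new-doss-othello | DERNIERE VERSION.py | recursifb
-- ===== SOURCE A (Python) =====
-- bordg=[0,8,16,24,32,40,48,56]     #bord gauche
--
-- bordd=[7,15,23,31,39,47,55,63]      #bord droit
--
-- def recursifb(lb,lw,cp,i,j,a,b):                                    #fonction recursive qui retourne la case sur laquelle peut jouer le joueur noir pour une certaine case de départ
--     if i+j*(a-2) in bordd and j in [-7,+1,+9]:                      #et une certaine direction j    renvoie None si pas de coup possible
--         return None                                                 #ma petite fierté cette fonction
--     if i+j*(a-2) in bordg and j in [-9,-1,+7]: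
--         return None
--     if i+j*b in lw and i+j*a not in cp and i+j*a not in lb and i+j*a not in lw :
--         if i+j*b in bordd and j in [-7,+1,+9]:
--             return None
--         if i+j*b in bordg and j in [-9,-1,+7]:
--             return None
--         return i+j*a
--     if i+j*b in lw and i+j*a not in cp and i+j*a not in lb and i+j*a in lw:
--         a+=1
--         b+=1
--         return(recursifb(lb,lw,cp,i,j,a,b))
-- ===== SOURCE B (Python) =====
-- bordg=[0,8,16,24,32,40,48,56]
-- bordd=[7,15,23,31,39,47,55,63]
--
-- def recursifb(lb, lw, cp, i, j, a, b):
--     # stage 1: length K of the leading run of 'keep walking' steps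
--     K = 0
--     while (i+j*(b+K) in lw and i+j*(a+K) not in cp
--            and i+j*(a+K) not in lb and i+j*(a+K) in lw):
--         K += 1
--     # stage 2: did an edge guard fire on any executed step?
--     for k in range(K+1):
--         c = i + j*(a+k-2)
--         if (c in bordd and j in (-7, 1, 9)) or (c in bordg and j in (-9, -1, 7)):
--             return None
--     # stage 3: terminal branch at step K
--     s = i + j*(a+K)
--     t = i + j*(b+K)
--     if t in lw and s not in cp and s not in lb and s not in lw:
--         if t in bordd and j in (-7, 1, 9):
--             return None
--         if t in bordg and j in (-9, -1, 7):
--             return None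
--         return s
--     return None
-- ===== Notes on version B (the rewrite author's own statement) =====
-- stated objective: alternative
-- what changed: Instead of one recursive walk that interleaves guards with the step decision, B works in three staged passes: it first computes the run length K of consecutive 'keep walking' steps, then scans the K+1 executed positions for an edge-guard hit, then evaluates the terminal landing branch once at offset K.
import Mathlib
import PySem

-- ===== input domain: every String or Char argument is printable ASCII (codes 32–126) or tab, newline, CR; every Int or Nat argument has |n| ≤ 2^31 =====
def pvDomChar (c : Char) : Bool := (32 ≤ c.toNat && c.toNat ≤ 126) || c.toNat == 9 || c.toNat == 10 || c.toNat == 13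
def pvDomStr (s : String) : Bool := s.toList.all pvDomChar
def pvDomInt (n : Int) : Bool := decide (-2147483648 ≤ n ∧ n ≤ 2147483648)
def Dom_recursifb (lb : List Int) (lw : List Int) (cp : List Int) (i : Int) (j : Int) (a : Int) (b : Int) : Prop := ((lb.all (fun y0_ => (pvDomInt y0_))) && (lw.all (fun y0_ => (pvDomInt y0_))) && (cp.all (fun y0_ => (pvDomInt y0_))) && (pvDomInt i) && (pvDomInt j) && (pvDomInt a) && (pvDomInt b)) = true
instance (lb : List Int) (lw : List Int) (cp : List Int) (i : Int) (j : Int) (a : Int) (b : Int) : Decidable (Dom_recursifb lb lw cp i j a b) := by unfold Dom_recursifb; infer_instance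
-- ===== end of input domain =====

-- B replaces A's single recursive walk by three staged passes (run-length of walk steps, guard scan, one terminal evaluation); same return value wherever A returns (Pre_ excludes the j=0 inputs on which A raises RecursionError).


-- ===== PORT A =====
def bordg : List Int := [0, 8, 16, 24, 32, 40, 48, 56]
def bordd : List Int := [7, 15, 23, 31, 39, 47, 55, 63]

-- A's recursion, with a fuel counter as totality guard; within Pre_ each recursive
-- step visits a fresh element of lw, so fuel lw.length+1 is never exhausted.
def recursifbGo (lb : List Int) (lw : List Int) (cp : List Int) (i : Int) (j : Int) :
    Nat → Int → Int → Option Int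
  | 0, _, _ => none
  | fuel+1, a, b =>
    if (i + j*(a-2)) ∈ bordd ∧ j ∈ ([-7, 1, 9] : List Int) then none
    else if (i + j*(a-2)) ∈ bordg ∧ j ∈ ([-9, -1, 7] : List Int) then none
    else if (i + j*b) ∈ lw ∧ (i + j*a) ∉ cp ∧ (i + j*a) ∉ lb ∧ (i + j*a) ∉ lw then
      if (i + j*b) ∈ bordd ∧ j ∈ ([-7, 1, 9] : List Int) then none
      else if (i + j*b) ∈ bordg ∧ j ∈ ([-9, -1, 7] : List Int) then none
      else some (i + j*a)
    else if (i + j*b) ∈ lw ∧ (i + j*a) ∉ cp ∧ (i + j*a) ∉ lb ∧ (i + j*a) ∈ lw then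
      recursifbGo lb lw cp i j fuel (a+1) (b+1)
    else none

def recursifb (lb : List Int) (lw : List Int) (cp : List Int) (i : Int) (j : Int) (a : Int) (b : Int) : Option Int :=
  recursifbGo lb lw cp i j (lw.length + 1) a b

-- ===== PORT B =====
-- stage 1: run length of consecutive 'keep walking' steps (bounded, as totality guard;
-- within Pre_ the bound is never reached)
def runLenB (lb : List Int) (lw : List Int) (cp : List Int) (i : Int) (j : Int) :
    Nat → Int → Int → Nat
  | 0, _, _ => 0
  | n+1, a, b =>
    if (i + j*b) ∈ lw ∧ (i + j*a) ∉ cp ∧ (i + j*a) ∉ lb ∧ (i + j*a) ∈ lw then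
      runLenB lb lw cp i j n (a+1) (b+1) + 1
    else 0

-- stage 2: does an edge guard fire at any of the first m offsets starting at a?
def guardHitB (i : Int) (j : Int) : Nat → Int → Bool
  | 0, _ => false
  | m+1, a =>
    (decide ((i + j*(a-2)) ∈ bordd ∧ j ∈ ([-7, 1, 9] : List Int))
      || decide ((i + j*(a-2)) ∈ bordg ∧ j ∈ ([-9, -1, 7] : List Int)))
      || guardHitB i j m (a+1)

-- stage 3: the terminal landing branch, evaluated once at the run's end
def terminalB (lb : List Int) (lw : List Int) (cp : List Int) (j : Int) (s : Int) (t : Int) : Option Int :=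
  if t ∈ lw ∧ s ∉ cp ∧ s ∉ lb ∧ s ∉ lw then
    if t ∈ bordd ∧ j ∈ ([-7, 1, 9] : List Int) then none
    else if t ∈ bordg ∧ j ∈ ([-9, -1, 7] : List Int) then none
    else some s
  else none

def altCoreB (lb : List Int) (lw : List Int) (cp : List Int) (i : Int) (j : Int)
    (limit : Nat) (a : Int) (b : Int) : Option Int :=
  let K := runLenB lb lw cp i j limit a b
  if guardHitB i j (min (K+1) limit) a then none
  else if K = limit then none
  else terminalB lb lw cp j (i + j*(a + (K : Int))) (i + j*(b + (K : Int)))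

def recursifb_alt (lb : List Int) (lw : List Int) (cp : List Int) (i : Int) (j : Int) (a : Int) (b : Int) : Option Int :=
  altCoreB lb lw cp i j (lw.length + 1) a b

-- ===== PRECONDITION & SPEC =====
-- Pre_ excludes exactly the inputs on which Python A recurses forever on identical
-- state (j = 0 with i in lw but in neither cp nor lb) and raises RecursionError.
def Pre_recursifb (lb : List Int) (lw : List Int) (cp : List Int) (i : Int) (j : Int) (a : Int) (b : Int) : Prop :=
  ¬ (j = 0 ∧ i ∈ lw ∧ i ∉ cp ∧ i ∉ lb)
instance (lb : List Int) (lw : List Int) (cp : List Int) (i : Int) (j : Int) (a : Int) (b : Int) : Decidable (Pre_recursifb lb lw cp i j a b) := by unfold Pre_recursifb; infer_instance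

def pvWitness_recursifb : List Int × List Int × List Int × Int × Int × Int × Int :=
  ([20], [19], [], 18, 1, 2, 1)

def Spec_recursifb (lb : List Int) (lw : List Int) (cp : List Int) (i : Int) (j : Int) (a : Int) (b : Int) (out : Option Int) : Prop := out = recursifb_alt lb lw cp i j a b
instance (lb : List Int) (lw : List Int) (cp : List Int) (i : Int) (j : Int) (a : Int) (b : Int) (out : Option Int) : Decidable (Spec_recursifb lb lw cp i j a b out) := by unfold Spec_recursifb; infer_instance

-- ===== CLAIM (what is proved, stated in full; the proofs are below) =====
def Claim_equal_recursifb : Prop := ∀ (lb : List Int) (lw : List Int) (cp : List Int) (i : Int) (j : Int) (a : Int) (b : Int), Dom_recursifb lb lw cp i j a b → Pre_recursifb lb lw cp i j a b → Spec_recursifb lb lw cp i j a b (recursifb lb lw cp i j a b)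

-- ===== LEMMAS AND PROOFS =====
theorem go_eq_core (lb lw cp : List Int) (i j : Int) :
    ∀ (fuel : Nat) (a b : Int),
      recursifbGo lb lw cp i j fuel a b = altCoreB lb lw cp i j fuel a b := by
  intro fuel
  induction fuel with
  | zero =>
    intro a b
    simp [recursifbGo, altCoreB, runLenB, guardHitB]
  | succ n ih =>
    intro a b
    rw [recursifbGo]
    simp only [altCoreB, runLenB]
    by_cases hg1 : (i + j*(a-2)) ∈ bordd ∧ j ∈ ([-7, 1, 9] : List Int)
    · rw [if_pos hg1, Nat.succ_min_succ, guardHitB]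
      simp [hg1]
    · by_cases hg2 : (i + j*(a-2)) ∈ bordg ∧ j ∈ ([-9, -1, 7] : List Int)
      · rw [if_neg hg1, if_pos hg2, Nat.succ_min_succ, guardHitB]
        simp [hg2]
      · have hgg : (decide ((i + j*(a-2)) ∈ bordd ∧ j ∈ ([-7, 1, 9] : List Int))
            || decide ((i + j*(a-2)) ∈ bordg ∧ j ∈ ([-9, -1, 7] : List Int))) = false := by
          simp only [Bool.or_eq_false_iff, decide_eq_false_iff_not]
          exact ⟨hg1, hg2⟩
        by_cases hW : (i + j*b) ∈ lw ∧ (i + j*a) ∉ cp ∧ (i + j*a) ∉ lb ∧ (i + j*a) ∈ lw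
        · -- walking step: reduce to fuel n at (a+1, b+1) and use the IH
          have hC : ¬ ((i + j*b) ∈ lw ∧ (i + j*a) ∉ cp ∧ (i + j*a) ∉ lb ∧ (i + j*a) ∉ lw) := by
            intro h; exact h.2.2.2 hW.2.2.2
          rw [if_neg hg1, if_neg hg2, if_neg hC, if_pos hW, if_pos hW, ih]
          simp only [altCoreB]
          set K' := runLenB lb lw cp i j n (a+1) (b+1) with hK'
          rw [Nat.succ_min_succ, guardHitB, hgg, Bool.false_or]
          have hs : i + j*(a + ((K' + 1 : Nat) : Int)) = i + j*((a+1) + (K' : Int)) := by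
            push_cast; ring
          have ht : i + j*(b + ((K' + 1 : Nat) : Int)) = i + j*((b+1) + (K' : Int)) := by
            push_cast; ring
          rw [hs, ht]
          rcases eq_or_ne K' n with hKn | hKn
          · simp [hKn]
          · rw [if_neg hKn, if_neg (by omega : ¬ (K' + 1 = n + 1))]
        · -- the run is empty: K = 0, terminal branch coincides with A's
          rw [if_neg hg1, if_neg hg2, if_neg hW, if_neg hW]
          have hmin : min (0 + 1) (n + 1) = 0 + 1 := by omega
          rw [hmin, guardHitB, hgg, Bool.false_or, guardHitB]
          simp only [Bool.false_eq_true, if_false]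
          rw [if_neg (by omega : ¬ (0 = n + 1))]
          simp only [Nat.cast_zero, add_zero]
          rw [terminalB]

-- ===== VERDICT (by name: the statement is the Claim_ definition above) =====
theorem recursifb_spec : Claim_equal_recursifb := by
  intro lb lw cp i j a b _ _
  unfold Spec_recursifb recursifb recursifb_alt
  exact go_eq_core lb lw cp i j (lw.length + 1) a b
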